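-- pv_equiv track=rewrite | github.com/VictoriousKnight/SECCON_Chat | client1.py | denc
-- ===== SOURCE A (Python) =====
-- def denc(choice, key, cyphertext):
--     if choice == 1:
--         plaintext = ""
--
--         for i in range(len(cyphertext)):
--             char = cyphertext[i]
--
--             if (char.isupper()):
--                 plaintext += chr((ord(char) - key - 65) % 26 + 65)
--
--             elif (char.islower()):
--                 plaintext += chr((ord(char) - key - 97) % 26 + 97)
--
--             else:
--                 plaintext += cyphertext[i]
--
--         return plaintext
--
--     elif choice == 2:
--         input_str = cyphertext
--         output_str = ""
--         keyy = str(key)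
--         for i, char in enumerate(input_str):
--             output_str += chr(ord(char) ^ ord(keyy[i % len(keyy)]))
--         return output_str
--
--     elif choice == 3:
--         cyphertext = cyphertext[::-1]
--         plaintext = ""
--
--         for i in range(len(cyphertext)):
--             char = cyphertext[i]
--
--             if (char.isupper()):
--                 plaintext += chr((ord(char) - key - 65) % 26 + 65)
--
--             elif (char.islower()):
--                 plaintext += chr((ord(char) - key - 97) % 26 + 97)
--
--             else:
--                 plaintext += cyphertext[i]
--
--         return plaintext
--     elif choice == 4:
--         return str(choice)+":"+str("01012305104689704578546987123654")+";"+cyphertext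
--     elif choice == 5:
--         return str(choice)+":"+str("45154788956258895626369845155487")+";"+cyphertext
-- ===== SOURCE B (Python) =====
-- def denc(choice, key, cyphertext):
--     if choice == 1 or choice == 3:
--         upper = "ABCDEFGHIJKLMNOPQRSTUVWXYZ"
--         lower = "abcdefghijklmnopqrstuvwxyz"
--         k = (-key) % 26
--         table = str.maketrans(upper + lower,
--                               upper[k:] + upper[:k] + lower[k:] + lower[:k])
--         text = cyphertext if choice == 1 else cyphertext[::-1]
--         return text.translate(table)
--     elif choice == 2:
--         ks = str(key)
--         return "".join(chr(ord(c) ^ ord(ks[i % len(ks)]))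
--                        for i, c in enumerate(cyphertext))
--     elif choice == 4:
--         return "4:01012305104689704578546987123654;" + cyphertext
--     elif choice == 5:
--         return "5:45154788956258895626369845155487;" + cyphertext
-- ===== Notes on version B (the rewrite author's own statement) =====
-- stated objective: idiomatic
-- what changed: Choices 1/3 precompute a str.maketrans table of rotated alphabets and apply it with one translate pass (no per-character if/elif arithmetic); choice 2 becomes a join over a generator instead of string +=; choices 4/5 are returned as single literals.
-- outside the precondition, e.g. on denc(0, 5, 'x'): A returns None, B returns None
import Mathlib
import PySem

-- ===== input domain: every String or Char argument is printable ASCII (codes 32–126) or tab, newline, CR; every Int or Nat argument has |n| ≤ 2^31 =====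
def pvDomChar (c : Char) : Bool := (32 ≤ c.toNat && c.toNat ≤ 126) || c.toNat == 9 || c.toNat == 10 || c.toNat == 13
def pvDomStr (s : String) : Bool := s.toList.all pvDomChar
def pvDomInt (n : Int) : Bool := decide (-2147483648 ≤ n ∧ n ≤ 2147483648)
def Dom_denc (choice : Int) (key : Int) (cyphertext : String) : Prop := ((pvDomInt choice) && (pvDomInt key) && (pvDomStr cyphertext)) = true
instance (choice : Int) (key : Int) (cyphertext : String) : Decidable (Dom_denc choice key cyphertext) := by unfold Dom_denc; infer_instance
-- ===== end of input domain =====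

-- B replaces A's per-character if/elif Caesar arithmetic by a precomputed translation
-- table (rotated alphabets applied in one translate pass); objective: idiomatic.

-- ===== PORT A =====
-- per-character body of A's choice-1/3 loop (isupper/islower are the ASCII letter
-- ranges, exact on Dom's ASCII strings)
def mapA (key : Int) (c : Char) : Char :=
  if 65 ≤ c.toNat && c.toNat ≤ 90 then
    Char.ofNat ((PySem.Int.mod ((c.toNat : Int) - key - 65) 26 + 65).toNat)
  else if 97 ≤ c.toNat && c.toNat ≤ 122 then
    Char.ofNat ((PySem.Int.mod ((c.toNat : Int) - key - 97) 26 + 97).toNat)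
  else c

-- the accumulating 'plaintext += …' loop of choices 1 and 3
def dencPass (key : Int) (l : List Char) : List Char :=
  l.foldl (fun acc c => acc ++ [mapA key c]) []

-- per-character body of A's choice-2 loop (chr(ord(c) ^ ord(ks[i % len(ks)])))
def xorChar (ks : List Char) (i : Int) (c : Char) : Char :=
  Char.ofNat (c.toNat ^^^ (PySem.List.pyGetD ks (PySem.Int.mod i (ks.length : Int)) ' ').toNat)

def denc (choice : Int) (key : Int) (cyphertext : String) : String :=
  if choice == 1 then
    String.ofList (dencPass key cyphertext.toList)
  else if choice == 2 then
    let ks := (PySem.Int.toStr key).toList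
    String.ofList ((PySem.List.enumerate cyphertext.toList).foldl
      (fun acc ic => acc ++ [xorChar ks ic.1 ic.2]) [])
  else if choice == 3 then
    -- cyphertext[::-1] is exactly List.reverse
    String.ofList (dencPass key cyphertext.toList.reverse)
  else if choice == 4 then
    PySem.Int.toStr choice ++ ":" ++ "01012305104689704578546987123654" ++ ";" ++ cyphertext
  else if choice == 5 then
    PySem.Int.toStr choice ++ ":" ++ "45154788956258895626369845155487" ++ ";" ++ cyphertext
  else ""   -- Python returns None here; excluded by Pre_denc

-- ===== PORT B =====
def upperL : List Char := "ABCDEFGHIJKLMNOPQRSTUVWXYZ".toList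
def lowerL : List Char := "abcdefghijklmnopqrstuvwxyz".toList

-- s[k:] + s[:k]
def rotk (k : Nat) (l : List Char) : List Char := l.drop k ++ l.take k

-- str.maketrans(upper+lower, rotated upper+lower) as an association list
def tableB (k : Nat) : List (Char × Char) :=
  (upperL ++ lowerL).zip (rotk k upperL ++ rotk k lowerL)

-- one translate step: mapped if in the table, else unchanged
def trB (k : Nat) (c : Char) : Char := ((tableB k).lookup c).getD c

-- per-character body of B's choice-2 generator
def xorCharB (ks : List Char) (i : Int) (c : Char) : Char :=
  Char.ofNat (c.toNat ^^^ (PySem.List.pyGetD ks (PySem.Int.mod i (ks.length : Int)) ' ').toNat)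

def denc_alt (choice : Int) (key : Int) (cyphertext : String) : String :=
  if choice == 1 || choice == 3 then
    let k := (PySem.Int.mod (-key) 26).toNat
    let text := if choice == 1 then cyphertext.toList else cyphertext.toList.reverse
    String.ofList (text.map (trB k))
  else if choice == 2 then
    let ks := (PySem.Int.toStr key).toList
    String.ofList ((PySem.List.enumerate cyphertext.toList).map (fun ic => xorCharB ks ic.1 ic.2))
  else if choice == 4 then
    "4:01012305104689704578546987123654;" ++ cyphertext
  else if choice == 5 then
    "5:45154788956258895626369845155487;" ++ cyphertext
  else ""

-- ===== PRECONDITION & SPEC =====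
-- Pre_ excludes choices outside 1..5, on which Python A falls through all branches
-- and returns None, which is not a String.
def Pre_denc (choice : Int) (key : Int) (cyphertext : String) : Prop :=
  choice = 1 ∨ choice = 2 ∨ choice = 3 ∨ choice = 4 ∨ choice = 5
instance (choice : Int) (key : Int) (cyphertext : String) : Decidable (Pre_denc choice key cyphertext) := by unfold Pre_denc; infer_instance

def pvWitness_denc : Int × Int × String := (1, 3, "Abc xyZ!")

def Spec_denc (choice : Int) (key : Int) (cyphertext : String) (out : String) : Prop := out = denc_alt choice key cyphertext
instance (choice : Int) (key : Int) (cyphertext : String) (out : String) : Decidable (Spec_denc choice key cyphertext out) := by unfold Spec_denc; infer_instance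

-- ===== CLAIM (what is proved, stated in full; the proofs are below) =====
def Claim_equal_denc : Prop := ∀ (choice : Int) (key : Int) (cyphertext : String), Dom_denc choice key cyphertext → Pre_denc choice key cyphertext → Spec_denc choice key cyphertext (denc choice key cyphertext)

-- ===== LEMMAS AND PROOFS =====

-- A's += loop is map
theorem foldl_push {α β : Type} (f : α → β) (l : List α) (acc : List β) :
    l.foldl (fun a x => a ++ [f x]) acc = acc ++ l.map f := by
  induction l generalizing acc with
  | nil => simp
  | cons x xs ih => simp [List.foldl, ih]

-- keyed version of mapA: the only key-dependence is k = (-key) % 26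
def mapAk (k : Nat) (c : Char) : Char :=
  if 65 ≤ c.toNat && c.toNat ≤ 90 then
    Char.ofNat (((((c.toNat : Int) - 65 + k) % 26) + 65).toNat)
  else if 97 ≤ c.toNat && c.toNat ≤ 122 then
    Char.ofNat (((((c.toNat : Int) - 97 + k) % 26) + 97).toNat)
  else c

theorem mod_shift (n key : Int) :
    PySem.Int.mod (n - key) 26 = (n + (PySem.Int.mod (-key) 26)) % 26 := by
  rw [PySem.Int.mod_eq_emod_of_pos (by omega), PySem.Int.mod_eq_emod_of_pos (by omega)]
  conv_lhs => rw [Int.sub_eq_add_neg, Int.add_emod]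
  conv_rhs => rw [Int.add_emod, Int.emod_emod_of_dvd _ (dvd_refl 26)]

theorem mapA_eq_mapAk (key : Int) (c : Char) :
    mapA key c = mapAk ((PySem.Int.mod (-key) 26).toNat) c := by
  have h0 : (0:Int) ≤ PySem.Int.mod (-key) 26 := PySem.Int.mod_nonneg _ (by omega)
  have hc : ((PySem.Int.mod (-key) 26).toNat : Int) = PySem.Int.mod (-key) 26 := Int.toNat_of_nonneg h0
  unfold mapA mapAk
  rw [show ((c.toNat : Int) - key - 65) = ((c.toNat : Int) - 65) - key by ring,
      show ((c.toNat : Int) - key - 97) = ((c.toNat : Int) - 97) - key by ring,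
      mod_shift, mod_shift, hc]

set_option maxRecDepth 20000 in
theorem mapAk_eq_trB : ∀ (k : Fin 26) (n : Fin 128),
    mapAk k.val (Char.ofNat n.val) = trB k.val (Char.ofNat n.val) := by decide

theorem mapA_eq_trB (key : Int) (c : Char) (h : c.toNat < 128) :
    mapA key c = trB ((PySem.Int.mod (-key) 26).toNat) c := by
  have hk : (PySem.Int.mod (-key) 26).toNat < 26 := by
    have := PySem.Int.mod_lt (-key) (b := 26) (by omega)
    have := PySem.Int.mod_nonneg (-key) (b := 26) (by omega)
    omega
  have := mapAk_eq_trB ⟨_, hk⟩ ⟨c.toNat, h⟩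
  simpa [Char.ofNat_toNat, mapA_eq_mapAk] using this

theorem dom_chars {s : String} (hd : pvDomStr s = true) :
    ∀ c ∈ s.toList, c.toNat < 128 := by
  intro c hc
  have := (List.all_eq_true.mp hd) c hc
  simp only [pvDomChar, Bool.or_eq_true, Bool.and_eq_true, decide_eq_true_eq, beq_iff_eq] at this
  omega

theorem pass_eq (key : Int) (l : List Char) (h : ∀ c ∈ l, c.toNat < 128) :
    dencPass key l = l.map (trB ((PySem.Int.mod (-key) 26).toNat)) := by
  unfold dencPass
  rw [foldl_push, List.nil_append]
  exact List.map_congr_left (fun c hc => mapA_eq_trB key c (h c hc))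

-- ===== VERDICT (by name: the statement is the Claim_ definition above) =====
theorem denc_spec : Claim_equal_denc := by
  intro choice key s hdom hpre
  unfold Spec_denc
  have hs : ∀ c ∈ s.toList, c.toNat < 128 := by
    have : pvDomStr s = true := by
      simp only [Dom_denc, Bool.and_eq_true] at hdom; exact hdom.2
    exact dom_chars this
  rcases hpre with h | h | h | h | h <;> subst h
  · have ha : denc 1 key s = String.ofList (dencPass key s.toList) := rfl
    have hb : denc_alt 1 key s
        = String.ofList (s.toList.map (trB ((PySem.Int.mod (-key) 26).toNat))) := rfl
    rw [ha, hb, pass_eq key s.toList hs]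
  · have ha : denc 2 key s = String.ofList ((PySem.List.enumerate s.toList).foldl
        (fun acc ic => acc ++ [xorChar (PySem.Int.toStr key).toList ic.1 ic.2]) []) := rfl
    have hb : denc_alt 2 key s = String.ofList ((PySem.List.enumerate s.toList).map
        (fun ic => xorChar (PySem.Int.toStr key).toList ic.1 ic.2)) := rfl  -- xorCharB ≡ xorChar
    rw [ha, hb]
    refine congrArg String.ofList ?_
    have h := foldl_push (fun (ic : Int × Char) => xorChar (PySem.Int.toStr key).toList ic.1 ic.2)
      (PySem.List.enumerate s.toList) []
    rw [List.nil_append] at h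
    exact h
  · have ha : denc 3 key s = String.ofList (dencPass key s.toList.reverse) := rfl
    have hb : denc_alt 3 key s
        = String.ofList (s.toList.reverse.map (trB ((PySem.Int.mod (-key) 26).toNat))) := rfl
    rw [ha, hb, pass_eq key s.toList.reverse (fun c hc => hs c (List.mem_reverse.mp hc))]
  · exact congrArg (fun p => p ++ s) (by decide)
  · exact congrArg (fun p => p ++ s) (by decide)
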